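-- pv_equiv track=rewrite | github.com/mcmanus-git/advent_of_code_2020 | Day 7/day_seven.py | find_containers
-- ===== SOURCE A (Python) =====
-- def find_containers(parent, backward):
--     if parent in backward.keys():
--         parents = backward[parent]
--         bv = set()
--         backward.pop(parent)
--         for prnt in parents:
--             bv.add(prnt)
--             for val in find_containers(prnt, backward):
--                 bv.add(val)
--         return bv
--     else:
--         return set()
-- ===== SOURCE B (Python) =====
-- def find_containers(parent, backward):
--     children = backward.get(parent)
--     if children is None:
--         return set()
--     result = set()
--     expanded = {parent}
--     stack = list(reversed(children))
--     while stack: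
--         x = stack.pop()
--         result.add(x)
--         if x not in expanded:
--             expanded.add(x)
--             stack.extend(reversed(backward.get(x, ())))
--     return result
-- ===== Notes on version B (the rewrite author's own statement) =====
-- stated objective: alternative
-- what changed: A's recursive DFS that pops dict keys and merges each child's whole result set into the parent's set is replaced by a single iterative stack DFS with one shared visited set and one result set, so no recursion and no per-node set unions are performed; B also leaves the input dict unmutated (A pops keys from it in place).
import Mathlib
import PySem

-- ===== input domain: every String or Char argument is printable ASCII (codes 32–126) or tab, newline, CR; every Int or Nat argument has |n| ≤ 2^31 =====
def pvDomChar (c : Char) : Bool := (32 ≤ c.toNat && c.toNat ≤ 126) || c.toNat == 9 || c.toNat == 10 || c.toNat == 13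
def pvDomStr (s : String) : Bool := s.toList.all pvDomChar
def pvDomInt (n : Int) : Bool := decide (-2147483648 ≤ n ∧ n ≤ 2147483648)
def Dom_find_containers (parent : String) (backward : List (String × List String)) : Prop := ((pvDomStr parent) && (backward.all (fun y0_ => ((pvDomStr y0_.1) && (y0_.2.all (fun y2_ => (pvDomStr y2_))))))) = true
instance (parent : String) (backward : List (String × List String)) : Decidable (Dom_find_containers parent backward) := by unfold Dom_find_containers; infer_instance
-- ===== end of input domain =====

-- B replaces A's recursive DFS (which pops dict keys and merges per-node sets) by an
-- iterative stack DFS with one shared visited set; equivalence is about the RETURN value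
-- only — Python A pops keys from `backward` in place, B leaves it untouched.

-- ===== PORT A =====
-- Termination helpers for the port of A (cited in decreasing_by).
theorem pvSizeEraseLe (d : PySem.Dict String (List String)) (p : String) :
    (d.erase p).size ≤ d.size := by
  simpa [PySem.Dict.erase, PySem.Dict.size] using List.length_filter_le _ d.items

theorem pvSizeEraseLt {d : PySem.Dict String (List String)} {p : String} {cs : List String}
    (h : d.get? p = some cs) : (d.erase p).size < d.size := by
  simp only [PySem.Dict.get?, Option.map_eq_some_iff] at h
  obtain ⟨pair, hf, -⟩ := h
  have hmem := List.mem_of_find?_eq_some hf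
  have hpred := List.find?_some hf
  simp only [PySem.Dict.erase, PySem.Dict.size]
  exact List.length_filter_lt_length_iff_exists.mpr ⟨pair, hmem, by simp [hpred]⟩

-- `fcA d ps bv` is the body of A's recursion: the `for prnt in parents:` loop over `ps`
-- with accumulator `bv`, threading the mutated dict `d`; each recursive call of A is the
-- `d.get? p` match (key present: pop the key, recurse over its list from a fresh set;
-- absent: the recursive call returns set() and adds nothing).  The dict component
-- carries its size bound so the recursion is well founded.
def fcA (d : PySem.Dict String (List String)) (ps : List String) (bv : PySem.Set String) :
    {r : PySem.Set String × PySem.Dict String (List String) // r.2.size ≤ d.size} :=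
  match ps with
  | [] => ⟨(bv, d), le_refl _⟩
  | p :: rest =>
    let bv1 := PySem.Set.add bv p                               -- bv.add(prnt)
    match h : d.get? p with
    | none =>                                                    -- inner call returns set()
      fcA d rest bv1
    | some cs =>                                                 -- inner call: pop key, recurse
      let rc := fcA (d.erase p) cs (PySem.Set.ofList [])
      let bv2 := List.foldl PySem.Set.add bv1 rc.1.1             -- for val in …: bv.add(val)
      let r := fcA rc.1.2 rest bv2
      ⟨r.1, le_trans r.2 (le_trans rc.2 (pvSizeEraseLe d p))⟩
termination_by (d.size, ps.length)
decreasing_by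
  · exact Prod.Lex.right _ (Nat.lt_succ_self _)
  · exact Prod.Lex.left _ _ (pvSizeEraseLt h)
  · refine Prod.lex_iff.mpr ?_
    rcases lt_or_eq_of_le (le_trans rc.2 (pvSizeEraseLe d p)) with hlt | heq
    · exact Or.inl hlt
    · exact Or.inr ⟨heq, Nat.lt_succ_self _⟩

def find_containers (parent : String) (backward : List (String × List String)) : List String :=
  let d := PySem.Dict.ofList backward
  match d.get? parent with
  | some parents => (fcA (d.erase parent) parents (PySem.Set.ofList [])).1.1
  | none => PySem.Set.ofList []

-- ===== PORT B =====
-- Termination helper for the port of B (cited in decreasing_by).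
theorem pvFilterAddLt (keys : List String) (E : PySem.Set String) (x : String)
    (hxE : x ∉ E) (hxk : x ∈ keys) :
    (keys.filter (fun k => decide (k ∉ PySem.Set.add E x))).length
      < (keys.filter (fun k => decide (k ∉ E))).length := by
  have hsub : ∀ k : String, k ∉ PySem.Set.add E x → k ∉ E := by
    intro k hk hkE
    exact hk ((PySem.Set.mem_add E x k).mpr (Or.inl hkE))
  have hfe : keys.filter (fun k => decide (k ∉ PySem.Set.add E x))
      = (keys.filter (fun k => decide (k ∉ E))).filter
          (fun k => decide (k ∉ PySem.Set.add E x)) := by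
    rw [List.filter_filter]
    apply List.filter_congr
    intro k _
    by_cases hk : k ∈ PySem.Set.add E x
    · simp [hk]
    · have h1 : k ∉ E := fun hkE => hk ((PySem.Set.mem_add E x k).mpr (Or.inl hkE))
      simp [hk, h1]
  rw [hfe]
  apply List.length_filter_lt_length_iff_exists.mpr
  refine ⟨x, List.mem_filter.mpr ⟨hxk, by simp [hxE]⟩, ?_⟩
  simp [PySem.Set.mem_add]

-- `bLoop` is Source B's `while stack:` loop; the head of `stack` models the top of the
-- Python stack (Python pops from the end and pushes children reversed, so the next
-- popped elements are exactly `d[x]` in order, i.e. `d.getD x [] ++ rest` here).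
def bLoop (d : PySem.Dict String (List String)) (stack : List String)
    (expanded : PySem.Set String) (out : PySem.Set String) : PySem.Set String :=
  match stack with
  | [] => out
  | x :: rest =>
    let out' := PySem.Set.add out x                              -- result.add(x)
    if x ∈ expanded then
      bLoop d rest expanded out'
    else
      bLoop d (d.getD x [] ++ rest) (PySem.Set.add expanded x) out'
termination_by ((d.keys.filter (fun k => decide (k ∉ expanded))).length, stack.length)
decreasing_by
  · exact Prod.Lex.right _ (Nat.lt_succ_self _)
  · rename_i hx
    by_cases hk : x ∈ d.keys
    · exact Prod.Lex.left _ _ (pvFilterAddLt d.keys expanded x hx hk)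
    · have hd : d.getD x [] = [] := by
        rw [PySem.Dict.getD_eq_get?_getD,
          (PySem.Dict.get?_eq_none_iff_not_mem_keys d x).mpr hk]
        rfl
      have hfe : d.keys.filter (fun k => decide (k ∉ PySem.Set.add expanded x))
          = d.keys.filter (fun k => decide (k ∉ expanded)) := by
        apply List.filter_congr
        intro k hkmem
        have : k ≠ x := fun hkx => hk (hkx ▸ hkmem)
        simp [PySem.Set.mem_add, this]
      rw [hd, hfe]
      exact Prod.Lex.right _ (Nat.lt_succ_self _)

def find_containers_alt (parent : String) (backward : List (String × List String)) : List String :=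
  let d := PySem.Dict.ofList backward
  match d.get? parent with
  | none => []
  | some children => bLoop d children (PySem.Set.ofList [parent]) []

-- ===== PRECONDITION & SPEC =====
def Spec_find_containers (parent : String) (backward : List (String × List String)) (out : List String) : Prop := out = find_containers_alt parent backward
instance (parent : String) (backward : List (String × List String)) (out : List String) : Decidable (Spec_find_containers parent backward out) := by unfold Spec_find_containers; infer_instance

-- ===== CLAIM (what is proved, stated in full; the proofs are below) =====
def Claim_equal_find_containers : Prop := ∀ (parent : String) (backward : List (String × List String)), Dom_find_containers parent backward → Spec_find_containers parent backward (find_containers parent backward)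

-- ===== LEMMAS AND PROOFS =====

-- get? after erase
theorem pvFindFilter (k k' : String) (l : List (String × List String)) :
    List.find? (fun p => p.1 == k') (l.filter (fun p => !(p.1 == k)))
      = if k' = k then none else List.find? (fun p => p.1 == k') l := by
  induction l with
  | nil => simp
  | cons hd tl ih =>
    rw [List.filter_cons]
    by_cases h1 : hd.1 = k
    · rw [if_neg (by simp [h1]), ih]
      by_cases h2 : k' = k
      · rw [if_pos h2, if_pos h2]
      · rw [if_neg h2, if_neg h2,
          List.find?_cons_of_neg (by simp [h1, beq_iff_eq]; exact fun hh => h2 hh.symm)]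
    · rw [if_pos (by simp [h1])]
      by_cases h3 : hd.1 = k'
      · have h2 : ¬ k' = k := fun hh => h1 (h3.trans hh)
        rw [List.find?_cons_of_pos (by simp [h3]), if_neg h2,
          List.find?_cons_of_pos (by simp [h3])]
      · rw [List.find?_cons_of_neg (by simp [h3]), ih]
        by_cases h2 : k' = k
        · rw [if_pos h2, if_pos h2]
        · rw [if_neg h2, if_neg h2, List.find?_cons_of_neg (by simp [h3])]

theorem pvGetErase (d : PySem.Dict String (List String)) (k k' : String) :
    (d.erase k).get? k' = if k' = k then none else d.get? k' := by
  obtain ⟨items⟩ := d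
  simp only [PySem.Dict.erase, PySem.Dict.get?]
  rw [pvFindFilter]
  by_cases hk' : k' = k <;> simp [hk']

-- add via update
theorem pvAddEqUpdate {s : PySem.Set String} {x : String} :
    PySem.Set.add s x = PySem.Set.update s [x] := rfl

theorem pvFoldlEqUpdate (s : PySem.Set String) (l : List String) :
    List.foldl PySem.Set.add s l = PySem.Set.update s l := rfl

theorem pvAddNil (p : String) : PySem.Set.add (PySem.Set.ofList []) p = [p] := rfl

theorem pvOfListSingleton (p : String) : PySem.Set.ofList [p] = [p] := rfl

-- update distributes over add / update (the set-merge algebra)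
theorem pvUpdateAdd (a t : PySem.Set String) (x : String) :
    PySem.Set.update a (PySem.Set.add t x) = PySem.Set.add (PySem.Set.update a t) x := by
  by_cases hx : x ∈ t
  · rw [PySem.Set.add_of_mem hx, PySem.Set.add_of_mem]
    exact (PySem.Set.mem_update a t x).mpr (Or.inr hx)
  · rw [PySem.Set.add_of_not_mem hx, PySem.Set.update_append]
    rfl

theorem pvUpdateAssoc (a b c : PySem.Set String) :
    PySem.Set.update (PySem.Set.update a b) c = PySem.Set.update a (PySem.Set.update b c) := by
  induction c using List.reverseRecOn with
  | nil => simp [PySem.Set.update_nil]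
  | append_singleton c' x ih =>
    rw [PySem.Set.update_append, PySem.Set.update_append, ih]
    have : PySem.Set.update (PySem.Set.update b c') [x]
        = PySem.Set.add (PySem.Set.update b c') x := rfl
    rw [this, pvUpdateAdd a _ x]
    rfl

-- step equations for fcA
theorem pvFcANil (d : PySem.Dict String (List String)) (bv : PySem.Set String) :
    (fcA d [] bv).1 = (bv, d) := by
  rw [fcA]

theorem pvFcAConsNone {d : PySem.Dict String (List String)} {p : String}
    (rest : List String) (bv : PySem.Set String) (h : d.get? p = none) :
    (fcA d (p :: rest) bv).1 = (fcA d rest (PySem.Set.add bv p)).1 := by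
  rw [fcA]
  split <;> simp_all

theorem pvFcAConsSome {d : PySem.Dict String (List String)} {p : String} {cs : List String}
    (rest : List String) (bv : PySem.Set String) (h : d.get? p = some cs) :
    (fcA d (p :: rest) bv).1 =
      (fcA (fcA (d.erase p) cs (PySem.Set.ofList [])).1.2 rest
        (List.foldl PySem.Set.add (PySem.Set.add bv p)
          (fcA (d.erase p) cs (PySem.Set.ofList [])).1.1)).1 := by
  rw [fcA]
  split
  · simp_all
  · rename_i cs' heq'
    obtain rfl := Option.some.inj (h.symm.trans heq')
    rfl

-- step equations for bLoop
theorem pvBLoopNil (d : PySem.Dict String (List String)) (E out : PySem.Set String) :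
    bLoop d [] E out = out := by
  rw [bLoop]

theorem pvBLoopConsMem {d : PySem.Dict String (List String)} {x : String}
    (rest : List String) {E : PySem.Set String} (out : PySem.Set String) (hx : x ∈ E) :
    bLoop d (x :: rest) E out = bLoop d rest E (PySem.Set.add out x) := by
  rw [bLoop]
  simp [hx]

theorem pvBLoopConsNotMem {d : PySem.Dict String (List String)} {x : String}
    (rest : List String) {E : PySem.Set String} (out : PySem.Set String) (hx : x ∉ E) :
    bLoop d (x :: rest) E out
      = bLoop d (d.getD x [] ++ rest) (PySem.Set.add E x) (PySem.Set.add out x) := by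
  rw [bLoop]
  simp [hx]

-- the accumulator of fcA only collects: result = bv.update(emission), dict independent of bv
theorem pvL1 (d : PySem.Dict String (List String)) (ps : List String) (bv0 : PySem.Set String) :
    ∀ bv : PySem.Set String,
      (fcA d ps bv).1.1 = PySem.Set.update bv (fcA d ps (PySem.Set.ofList [])).1.1
      ∧ (fcA d ps bv).1.2 = (fcA d ps (PySem.Set.ofList [])).1.2 := by
  induction d, ps, bv0 using fcA.induct with
  | case1 d _ =>
    intro bv
    rw [pvFcANil, pvFcANil]
    exact ⟨(PySem.Set.update_nil bv).symm, rfl⟩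
  | case2 d _ p rest _ h ih =>
    intro bv
    rw [pvFcAConsNone rest bv h, pvFcAConsNone rest (PySem.Set.ofList []) h]
    obtain ⟨h1, h2⟩ := ih (PySem.Set.add bv p)
    obtain ⟨h1', h2'⟩ := ih (PySem.Set.add (PySem.Set.ofList []) p)
    refine ⟨?_, h2.trans h2'.symm⟩
    rw [h1, h1', pvAddNil, pvAddEqUpdate,
      pvUpdateAssoc bv [p] _]
  | case3 d _ p rest _ cs h _ _ _ _ ih2 =>
    intro bv
    rw [pvFcAConsSome rest bv h, pvFcAConsSome rest (PySem.Set.ofList []) h]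
    obtain ⟨h1, h2⟩ := ih2 (List.foldl PySem.Set.add (PySem.Set.add bv p)
      (fcA (d.erase p) cs (PySem.Set.ofList [])).1.1)
    obtain ⟨h1', h2'⟩ := ih2 (List.foldl PySem.Set.add
      (PySem.Set.add (PySem.Set.ofList []) p)
      (fcA (d.erase p) cs (PySem.Set.ofList [])).1.1)
    refine ⟨?_, h2.trans h2'.symm⟩
    rw [h1, h1', pvAddNil, pvFoldlEqUpdate, pvFoldlEqUpdate, pvAddEqUpdate,
      ← pvUpdateAssoc bv (PySem.Set.update [p]
          (fcA (d.erase p) cs (PySem.Set.ofList [])).1.1) _,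
      ← pvUpdateAssoc bv [p] _]

-- the emission of fcA is duplicate-free
theorem pvNodupFcA (d : PySem.Dict String (List String)) (ps : List String) (bv0 : PySem.Set String) :
    ∀ bv : PySem.Set String, bv.Nodup → (fcA d ps bv).1.1.Nodup := by
  induction d, ps, bv0 using fcA.induct with
  | case1 d _ =>
    intro bv hbv
    rw [pvFcANil]
    exact hbv
  | case2 d _ p rest _ h ih =>
    intro bv hbv
    rw [pvFcAConsNone rest bv h]
    exact ih _ (PySem.Set.nodup_add bv p hbv)
  | case3 d _ p rest _ cs h _ _ _ _ ih2 =>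
    intro bv hbv
    rw [pvFcAConsSome rest bv h]
    refine ih2 _ ?_
    rw [pvFoldlEqUpdate]
    exact PySem.Set.nodup_update _ _ (PySem.Set.nodup_add bv p hbv)

-- simulation: B's loop consumes the pending work exactly as A's recursion emits it
theorem pvSim (D0 : PySem.Dict String (List String))
    (d : PySem.Dict String (List String)) (ps : List String) (bv0 : PySem.Set String) :
    ∀ (E : PySem.Set String) (w : PySem.Set String) (Z : List String),
      (∀ k, d.get? k = if k ∈ E then none else D0.get? k) →
      ∃ E' : PySem.Set String,
        (∀ k, (fcA d ps (PySem.Set.ofList [])).1.2.get? k = if k ∈ E' then none else D0.get? k)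
        ∧ bLoop D0 (ps ++ Z) E w
            = bLoop D0 Z E' (PySem.Set.update w (fcA d ps (PySem.Set.ofList [])).1.1) := by
  induction d, ps, bv0 using fcA.induct with
  | case1 d _ =>
    intro E w Z hR
    refine ⟨E, ?_, ?_⟩
    · intro k
      rw [pvFcANil]
      exact hR k
    · rw [pvFcANil, List.nil_append]
      rfl
  | case2 d _ p rest _ h ih =>
    intro E w Z hR
    have hdict : (fcA d (p :: rest) (PySem.Set.ofList [])).1.2
        = (fcA d rest (PySem.Set.ofList [])).1.2 := by
      rw [pvFcAConsNone _ _ h]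
      exact ((pvL1 d rest (PySem.Set.ofList [])) _).2
    have hem : (fcA d (p :: rest) (PySem.Set.ofList [])).1.1
        = PySem.Set.update [p] (fcA d rest (PySem.Set.ofList [])).1.1 := by
      rw [pvFcAConsNone _ _ h, ((pvL1 d rest (PySem.Set.ofList [])) _).1, pvAddNil]
    have halg : ∀ w' : PySem.Set String,
        PySem.Set.update w' (fcA d (p :: rest) (PySem.Set.ofList [])).1.1
          = PySem.Set.update (PySem.Set.add w' p)
              (fcA d rest (PySem.Set.ofList [])).1.1 := by
      intro w'
      rw [hem, ← pvUpdateAssoc w' [p] _, pvAddEqUpdate]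
    by_cases hp : p ∈ E
    · obtain ⟨E', h1, h2⟩ := ih E (PySem.Set.add w p) Z hR
      refine ⟨E', ?_, ?_⟩
      · intro k
        rw [hdict]
        exact h1 k
      · rw [List.cons_append, pvBLoopConsMem _ _ hp, h2, halg]
    · have hd0 : D0.get? p = none := by
        have := hR p
        rw [if_neg hp, h] at this
        exact this.symm
      have hgetD : D0.getD p [] = [] := by
        rw [PySem.Dict.getD_eq_get?_getD, hd0]
        rfl
      have hR' : ∀ k, d.get? k = if k ∈ PySem.Set.add E p then none else D0.get? k := by
        intro k
        by_cases hk : k ∈ PySem.Set.add E p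
        · rw [if_pos hk]
          rcases (PySem.Set.mem_add E p k).mp hk with hkE | rfl
          · rw [hR k, if_pos hkE]
          · exact h
        · have hkE : k ∉ E := fun hh => hk ((PySem.Set.mem_add E p k).mpr (Or.inl hh))
          rw [if_neg hk, hR k, if_neg hkE]
      obtain ⟨E', h1, h2⟩ := ih (PySem.Set.add E p) (PySem.Set.add w p) Z hR'
      refine ⟨E', ?_, ?_⟩
      · intro k
        rw [hdict]
        exact h1 k
      · rw [List.cons_append, pvBLoopConsNotMem _ _ hp, hgetD, List.nil_append, h2, halg]
  | case3 d _ p rest _ cs h _ _ ihin _ ihexp =>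
    intro E w Z hR
    have hp : p ∉ E := by
      intro hpE
      have := hR p
      rw [if_pos hpE, h] at this
      cases this
    have hd0 : D0.get? p = some cs := by
      have := hR p
      rw [if_neg hp, h] at this
      exact this.symm
    have hgetD : D0.getD p [] = cs := by
      rw [PySem.Dict.getD_eq_get?_getD, hd0]
      rfl
    have hR' : ∀ k, (d.erase p).get? k = if k ∈ PySem.Set.add E p then none else D0.get? k := by
      intro k
      rw [pvGetErase]
      by_cases hkp : k = p
      · rw [if_pos hkp, if_pos ((PySem.Set.mem_add E p k).mpr (Or.inr hkp))]
      · rw [if_neg hkp]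
        by_cases hkE : k ∈ E
        · rw [hR k, if_pos hkE, if_pos ((PySem.Set.mem_add E p k).mpr (Or.inl hkE))]
        · rw [hR k, if_neg hkE, if_neg (fun hh => by
            rcases (PySem.Set.mem_add E p k).mp hh with h' | h'
            · exact hkE h'
            · exact hkp h')]
    obtain ⟨E1, hR1, heq1⟩ := ihin (PySem.Set.add E p) (PySem.Set.add w p) (rest ++ Z) hR'
    obtain ⟨E2, hR2, heq2⟩ := ihexp E1
      (PySem.Set.update (PySem.Set.add w p) (fcA (d.erase p) cs (PySem.Set.ofList [])).1.1)
      Z hR1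
    have hdict : (fcA d (p :: rest) (PySem.Set.ofList [])).1.2
        = (fcA (fcA (d.erase p) cs (PySem.Set.ofList [])).1.2 rest
            (PySem.Set.ofList [])).1.2 := by
      rw [pvFcAConsSome _ _ h]
      exact ((pvL1 _ rest (PySem.Set.ofList [])) _).2
    have hem : (fcA d (p :: rest) (PySem.Set.ofList [])).1.1
        = PySem.Set.update
            (PySem.Set.update [p] (fcA (d.erase p) cs (PySem.Set.ofList [])).1.1)
            (fcA (fcA (d.erase p) cs (PySem.Set.ofList [])).1.2 rest
              (PySem.Set.ofList [])).1.1 := by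
      rw [pvFcAConsSome _ _ h, ((pvL1 _ rest (PySem.Set.ofList [])) _).1,
        pvFoldlEqUpdate, pvAddNil]
    refine ⟨E2, ?_, ?_⟩
    · intro k
      rw [hdict]
      exact hR2 k
    · calc bLoop D0 ((p :: rest) ++ Z) E w
          = bLoop D0 (D0.getD p [] ++ (rest ++ Z)) (PySem.Set.add E p)
              (PySem.Set.add w p) := by
            rw [List.cons_append, pvBLoopConsNotMem _ _ hp]
        _ = bLoop D0 (cs ++ (rest ++ Z)) (PySem.Set.add E p) (PySem.Set.add w p) := by
            rw [hgetD]
        _ = bLoop D0 (rest ++ Z) E1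
              (PySem.Set.update (PySem.Set.add w p)
                (fcA (d.erase p) cs (PySem.Set.ofList [])).1.1) := heq1
        _ = bLoop D0 Z E2
              (PySem.Set.update
                (PySem.Set.update (PySem.Set.add w p)
                  (fcA (d.erase p) cs (PySem.Set.ofList [])).1.1)
                (fcA (fcA (d.erase p) cs (PySem.Set.ofList [])).1.2 rest
                  (PySem.Set.ofList [])).1.1) := heq2
        _ = bLoop D0 Z E2
              (PySem.Set.update w (fcA d (p :: rest) (PySem.Set.ofList [])).1.1) := by
            rw [hem,
              ← pvUpdateAssoc w
                (PySem.Set.update [p] (fcA (d.erase p) cs (PySem.Set.ofList [])).1.1) _,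
              ← pvUpdateAssoc w [p] _, pvAddEqUpdate]

-- ===== VERDICT (by name: the statement is the Claim_ definition above) =====
theorem find_containers_spec : Claim_equal_find_containers := by
  intro parent backward _
  unfold Spec_find_containers find_containers find_containers_alt
  cases h : (PySem.Dict.ofList backward).get? parent with
  | none =>
    simp only [h]
    rfl
  | some ps =>
    simp only [h]
    obtain ⟨E', _, heq⟩ := pvSim (PySem.Dict.ofList backward)
      ((PySem.Dict.ofList backward).erase parent) ps (PySem.Set.ofList [])
      (PySem.Set.ofList [parent]) [] [] (by
        intro k
        rw [pvGetErase, pvOfListSingleton]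
        by_cases hk : k = parent
        · rw [if_pos hk, if_pos (List.mem_singleton.mpr hk)]
        · rw [if_neg hk, if_neg (fun hh => hk (List.mem_singleton.mp hh))])
    rw [List.append_nil] at heq
    rw [heq, pvBLoopNil, PySem.Set.update_nil_left,
      PySem.Set.ofList_eq_self_of_nodup _
        (pvNodupFcA _ _ (PySem.Set.ofList []) (PySem.Set.ofList [])
          (by exact List.nodup_nil))]
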